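-- pv_equiv track=rewrite | github.com/yastn/yastn | yastn/tn/mps/_measure.py | _parse_2site_bonds
-- ===== SOURCE A (Python) =====
-- def _parse_2site_bonds(bonds, N):
--     if 'a' in bonds:
--         return [(i, j) for i in range(N) for j in range(N)]
--     pairs = []
--     if '<' in bonds:
--         pairs += [(i, j) for i in range(N) for j in range(i + 1, N)]
--         bonds = bonds.replace('<', '')
--     if '=' in bonds:
--         pairs += [(i, i) for i in range(N)]
--         bonds = bonds.replace('=', '')
--     if '>' in bonds:
--         pairs += [(i, j) for i in range(N) for j in range(i)]
--         bonds = bonds.replace('>', '')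
--     pbc = False
--     if 'p' in bonds:
--         pbc = True
--         bonds = bonds.replace('p', '')
--     if 'r' in bonds:  # only "r" are left
--         for r in bonds.split('r')[1:]:
--             r = int(r)
--             if pbc:
--                 pairs += [(i, (i + r) % N) for i in range(N)]
--             else:
--                 pairs += [(i, (i + r)) for i in range(N) if 0 <= i + r < N]
--     return sorted(set(pairs))
-- ===== SOURCE B (Python) =====
-- def _parse_2site_bonds(bonds, N):
--     if 'a' in bonds:
--         return [(i, j) for i in range(N) for j in range(N)]
--     want_upper = '<' in bonds
--     want_diag = '=' in bonds
--     want_lower = '>' in bonds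
--     pbc = 'p' in bonds
--     rest = bonds.replace('<', '').replace('=', '').replace('>', '').replace('p', '')
--     offsets = [int(t) for t in rest.split('r')[1:]] if 'r' in rest else []
--     if not (want_upper or want_diag or want_lower or offsets):
--         return []
--     out = []
--     for i in range(N):
--         js = set()
--         if want_upper:
--             js.update(range(i + 1, N))
--         if want_diag:
--             js.add(i)
--         if want_lower:
--             js.update(range(i))
--         for r in offsets:
--             j = (i + r) % N if pbc else i + r
--             if 0 <= j < N:
--                 js.add(j)
--         out += [(i, j) for j in sorted(js)]
--     return out
-- ===== Notes on version B (the rewrite author's own statement) =====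
-- stated objective: alternative
-- what changed: Instead of concatenating one index-pair comprehension per flag and then deduplicating and ordering with sorted(set(...)), B parses the flags once, walks the rows i = 0..N-1 in order, builds the set of partner columns of each row, and emits each row's sorted columns, so the output comes out ordered without any global sort.
import Mathlib
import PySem

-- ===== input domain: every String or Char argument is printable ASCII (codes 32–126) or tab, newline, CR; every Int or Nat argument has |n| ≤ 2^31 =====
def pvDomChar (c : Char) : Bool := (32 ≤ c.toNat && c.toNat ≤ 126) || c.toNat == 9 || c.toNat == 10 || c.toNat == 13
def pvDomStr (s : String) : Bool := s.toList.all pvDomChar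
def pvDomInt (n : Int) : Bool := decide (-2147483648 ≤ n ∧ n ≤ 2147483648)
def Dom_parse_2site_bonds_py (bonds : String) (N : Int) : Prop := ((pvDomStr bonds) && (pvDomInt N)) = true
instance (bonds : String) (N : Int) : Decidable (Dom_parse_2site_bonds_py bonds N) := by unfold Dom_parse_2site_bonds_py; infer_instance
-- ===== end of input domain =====

-- B re-implements the pair generation: instead of concatenating one comprehension per flag and
-- then sorted(set(...)), it walks the rows i = 0..N-1 once, builds the set of partner columns of
-- each row, and emits the rows in order (objective: alternative decomposition, no global sort).

-- ===== PORT A =====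
def parse_2site_bonds_py (bonds : String) (N : Int) : List (Int × Int) :=
  if PySem.Str.isIn "a" bonds then
    (PySem.List.pyRange 0 N 1).flatMap (fun i => (PySem.List.pyRange 0 N 1).map (fun j => (i, j)))
  else
    let pairs0 : List (Int × Int) := []
    let hlt := PySem.Str.isIn "<" bonds
    let pairs1 := if hlt then pairs0 ++ (PySem.List.pyRange 0 N 1).flatMap (fun i => (PySem.List.pyRange (i + 1) N 1).map (fun j => (i, j))) else pairs0
    let bonds1 := if hlt then PySem.Str.replace bonds "<" "" else bonds
    let heq := PySem.Str.isIn "=" bonds1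
    let pairs2 := if heq then pairs1 ++ (PySem.List.pyRange 0 N 1).map (fun i => (i, i)) else pairs1
    let bonds2 := if heq then PySem.Str.replace bonds1 "=" "" else bonds1
    let hgt := PySem.Str.isIn ">" bonds2
    let pairs3 := if hgt then pairs2 ++ (PySem.List.pyRange 0 N 1).flatMap (fun i => (PySem.List.pyRange 0 i 1).map (fun j => (i, j))) else pairs2
    let bonds3 := if hgt then PySem.Str.replace bonds2 ">" "" else bonds2
    let pbc := PySem.Str.isIn "p" bonds3
    let bonds4 := if pbc then PySem.Str.replace bonds3 "p" "" else bonds3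
    let pairs4 :=
      if PySem.Str.isIn "r" bonds4 then
        (((PySem.Str.split? bonds4 "r").getD []).drop 1).foldl
          (fun acc t =>
            match PySem.Int.ofStr? t with
            | some r =>
                if pbc then acc ++ (PySem.List.pyRange 0 N 1).map (fun i => (i, PySem.Int.mod (i + r) N))
                else acc ++ ((PySem.List.pyRange 0 N 1).filter (fun i => decide (0 ≤ i + r) && decide (i + r < N))).map (fun i => (i, i + r))
            | none => acc)  -- int(t) raises ValueError in Python: such inputs are outside Pre_
          pairs3
      else pairs3
    PySem.List.sorted2 (PySem.Set.ofList pairs4) (fun p => p.1) (fun p => p.2)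

-- ===== PORT B =====
-- the set of partner columns of row i (Source B's per-row `js`)
def pvRowSet (wu wd wl pbc : Bool) (offs : List Int) (N i : Int) : PySem.Set Int :=
  let js : PySem.Set Int := PySem.Set.empty
  let js := if wu then PySem.Set.update js (PySem.List.pyRange (i + 1) N 1) else js
  let js := if wd then PySem.Set.add js i else js
  let js := if wl then PySem.Set.update js (PySem.List.pyRange 0 i 1) else js
  offs.foldl
    (fun js r =>
      let j := if pbc then PySem.Int.mod (i + r) N else i + r
      if decide (0 ≤ j) && decide (j < N) then PySem.Set.add js j else js)
    js

def parse_2site_bonds_py_alt (bonds : String) (N : Int) : List (Int × Int) :=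
  if PySem.Str.isIn "a" bonds then
    (PySem.List.pyRange 0 N 1).flatMap (fun i => (PySem.List.pyRange 0 N 1).map (fun j => (i, j)))
  else
    let wu := PySem.Str.isIn "<" bonds
    let wd := PySem.Str.isIn "=" bonds
    let wl := PySem.Str.isIn ">" bonds
    let pbc := PySem.Str.isIn "p" bonds
    let rest := PySem.Str.replace (PySem.Str.replace (PySem.Str.replace (PySem.Str.replace bonds "<" "") "=" "") ">" "") "p" ""
    let offs : List Int :=
      if PySem.Str.isIn "r" rest then
        (((PySem.Str.split? rest "r").getD []).drop 1).filterMap PySem.Int.ofStr?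
      else []
    if !(wu || wd || wl || !offs.isEmpty) then []
    else (PySem.List.pyRange 0 N 1).foldl
      (fun out i => out ++ (PySem.List.sorted (pvRowSet wu wd wl pbc offs N i) (fun j => j)).map (fun j => (i, j)))
      []

-- ===== PRECONDITION & SPEC =====
-- Pre_ excludes exactly the inputs where Python A raises ValueError: no 'a' in bonds, and after
-- removing '<', '=', '>', 'p' an 'r' remains whose following token does not parse as an int.
def Pre_parse_2site_bonds_py (bonds : String) (N : Int) : Prop :=
  PySem.Str.isIn "a" bonds = true ∨
  (let rest := PySem.Str.replace (PySem.Str.replace (PySem.Str.replace (PySem.Str.replace bonds "<" "") "=" "") ">" "") "p" ""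
   PySem.Str.isIn "r" rest = false ∨
   ∀ t ∈ (((PySem.Str.split? rest "r").getD []).drop 1), (PySem.Int.ofStr? t).isSome = true)
instance (bonds : String) (N : Int) : Decidable (Pre_parse_2site_bonds_py bonds N) := by
  unfold Pre_parse_2site_bonds_py; infer_instance

def pvWitness_parse_2site_bonds_py : String × Int := ("<pr1r-1", 4)

def Spec_parse_2site_bonds_py (bonds : String) (N : Int) (out : List (Int × Int)) : Prop := out = parse_2site_bonds_py_alt bonds N
instance (bonds : String) (N : Int) (out : List (Int × Int)) : Decidable (Spec_parse_2site_bonds_py bonds N out) := by unfold Spec_parse_2site_bonds_py; infer_instance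

-- ===== CLAIM (what is proved, stated in full; the proofs are below) =====
def Claim_equal_parse_2site_bonds_py : Prop := ∀ (bonds : String) (N : Int), Dom_parse_2site_bonds_py bonds N → Pre_parse_2site_bonds_py bonds N → Spec_parse_2site_bonds_py bonds N (parse_2site_bonds_py bonds N)

-- ===== LEMMAS AND PROOFS =====

theorem pv_go_cons (c x : Char) (t acc : List Char) (n : Nat) :
    PySem.Chars.replace.go [c] [] (n+1) (x::t) acc =
      (if [c].isPrefixOf (x::t) then PySem.Chars.replace.go [c] [] n t acc
       else PySem.Chars.replace.go [c] [] n t (x :: acc)) := by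
  rw [PySem.Chars.replace.go.eq_def]
  simp

theorem pv_replaceGo_single (c : Char) : ∀ (fuel : Nat) (l acc : List Char), l.length ≤ fuel →
    PySem.Chars.replace.go [c] [] fuel l acc = acc.reverse ++ l.filter (fun x => x != c) := by
  intro fuel
  induction fuel with
  | zero =>
    intro l acc h
    have : l = [] := List.eq_nil_of_length_eq_zero (Nat.le_zero.mp h)
    subst this
    simp [PySem.Chars.replace.go]
  | succ n ih =>
    intro l acc h
    cases l with
    | nil => simp [PySem.Chars.replace.go]
    | cons x t =>
      rw [pv_go_cons]
      have ht : t.length ≤ n := by simpa using h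
      by_cases hx : x = c
      · subst hx
        rw [if_pos (by simp [List.isPrefixOf])]
        rw [ih t acc ht]
        simp
      · rw [if_neg (by simp [List.isPrefixOf]; exact fun he => hx he.symm)]
        rw [ih t (x :: acc) ht]
        simp [hx]

theorem pv_replace_single (s o : String) (c : Char) (ho : o.toList = [c]) :
    (PySem.Str.replace s o "").toList = s.toList.filter (fun x => x != c) := by
  rw [PySem.Str.toList_replace, ho]
  show PySem.Chars.replace _ [c] [] = _
  rw [PySem.Chars.replace]
  simpa using pv_replaceGo_single c s.toList.length s.toList [] le_rfl

theorem pv_isIn_single (o s : String) (c : Char) (ho : o.toList = [c]) :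
    PySem.Str.isIn o s = s.toList.contains c := by
  apply Bool.coe_iff_coe.mp
  rw [PySem.Str.isIn_iff_infix, ho, List.contains_iff_mem]
  constructor
  · intro h; exact h.sublist.mem (List.mem_singleton_self c)
  · intro h
    obtain ⟨pre, suf, he⟩ := List.mem_iff_append.mp h
    exact ⟨pre, suf, by rw [he]; simp⟩

theorem pv_contains_filter_ne (l : List Char) (c d : Char) (h : c ≠ d) :
    (l.filter (fun x => x != d)).contains c = l.contains c := by
  apply Bool.coe_iff_coe.mp
  simp [List.contains_iff_mem, List.mem_filter, h]

theorem pv_step_strip (s o : String) (c : Char) (ho : o.toList = [c]) :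
    (if PySem.Str.isIn o s then PySem.Str.replace s o "" else s).toList
      = s.toList.filter (fun x => x != c) := by
  by_cases h : PySem.Str.isIn o s = true
  · rw [if_pos h]; exact pv_replace_single s o c ho
  · rw [if_neg h]
    have hmem : c ∉ s.toList := by
      rw [pv_isIn_single o s c ho] at h
      simpa [List.contains_iff_mem] using h
    rw [List.filter_eq_self.mpr]
    intro a ha
    simp only [bne_iff_ne, ne_eq]
    exact fun he => hmem (he ▸ ha)

def pvCond (wu wd wl pbc : Bool) (offs : List Int) (N i j : Int) : Prop :=
  (wu = true ∧ i < j ∧ j < N) ∨ (wd = true ∧ j = i) ∨ (wl = true ∧ 0 ≤ j ∧ j < i) ∨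
  (∃ r ∈ offs, j = (if pbc then PySem.Int.mod (i + r) N else i + r) ∧ 0 ≤ j ∧ j < N)

theorem pv_foldl_mem (pbc : Bool) (N i j : Int) : ∀ (offs : List Int) (js : PySem.Set Int),
    (j ∈ offs.foldl
      (fun js r =>
        let j := if pbc then PySem.Int.mod (i + r) N else i + r
        if decide (0 ≤ j) && decide (j < N) then PySem.Set.add js j else js)
      js)
    ↔ (j ∈ js ∨ ∃ r ∈ offs, j = (if pbc then PySem.Int.mod (i + r) N else i + r) ∧ 0 ≤ j ∧ j < N) := by
  intro offs
  induction offs with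
  | nil => simp
  | cons r t ih =>
    intro js
    rw [List.foldl_cons, ih]
    by_cases hc : (0 ≤ (if pbc then PySem.Int.mod (i + r) N else i + r)) ∧ (if pbc then PySem.Int.mod (i + r) N else i + r) < N
    · rw [if_pos (by simp [hc.1, hc.2])]
      rw [PySem.Set.mem_add]
      constructor
      · rintro (⟨h | h⟩ | ⟨r', hr', h⟩)
        · exact Or.inl h
        · exact Or.inr ⟨r, List.mem_cons_self .., ⟨h, h ▸ hc.1, h ▸ hc.2⟩⟩
        · exact Or.inr ⟨r', List.mem_cons_of_mem _ hr', h⟩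
      · rintro (h | ⟨r', hr', h⟩)
        · exact Or.inl (Or.inl h)
        · rcases List.mem_cons.mp hr' with rfl | hr'
          · exact Or.inl (Or.inr h.1)
          · exact Or.inr ⟨r', hr', h⟩
    · rw [if_neg (by rcases not_and_or.mp hc with h | h <;> simp [h])]
      constructor
      · rintro (h | ⟨r', hr', h⟩)
        · exact Or.inl h
        · exact Or.inr ⟨r', List.mem_cons_of_mem _ hr', h⟩
      · rintro (h | ⟨r', hr', h⟩)
        · exact Or.inl h
        · rcases List.mem_cons.mp hr' with rfl | hr'
          · rcases h with ⟨hv, hj1, hj2⟩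
            rw [hv] at hj1 hj2
            exact absurd ⟨hj1, hj2⟩ hc
          · exact Or.inr ⟨r', hr', h⟩

theorem pv_mem_rowSet (wu wd wl pbc : Bool) (offs : List Int) (N i j : Int) :
    j ∈ pvRowSet wu wd wl pbc offs N i ↔ pvCond wu wd wl pbc offs N i j := by
  unfold pvRowSet pvCond
  rw [pv_foldl_mem]
  have h1 : ∀ (s : PySem.Set Int) (b : Bool) (xs : List Int),
      (j ∈ if b then PySem.Set.update s xs else s) ↔ (b = true ∧ j ∈ xs) ∨ j ∈ s := by
    intro s b xs; cases b <;> simp [PySem.Set.mem_update, or_comm]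
  have h2 : ∀ (s : PySem.Set Int) (b : Bool) (x : Int),
      (j ∈ if b then PySem.Set.add s x else s) ↔ (b = true ∧ j = x) ∨ j ∈ s := by
    intro s b x; cases b <;> simp [PySem.Set.mem_add, or_comm]
  rw [h1, h2, h1]
  simp only [PySem.Set.empty, List.not_mem_nil, or_false, PySem.List.mem_pyRange_one]
  constructor
  · rintro ((hl | (hd | hu)) | hr)
    · exact Or.inr (Or.inr (Or.inl ⟨hl.1, hl.2.1, hl.2.2⟩))
    · exact Or.inr (Or.inl hd)
    · exact Or.inl ⟨hu.1, by omega, hu.2.2⟩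
    · exact Or.inr (Or.inr (Or.inr hr))
  · rintro (hu | (hd | (hl | hr)))
    · exact Or.inl (Or.inr (Or.inr ⟨hu.1, by omega, hu.2.2⟩))
    · exact Or.inl (Or.inr (Or.inl hd))
    · exact Or.inl (Or.inl ⟨hl.1, hl.2.1, hl.2.2⟩)
    · exact Or.inr hr

theorem pv_nodup_rowSet (wu wd wl pbc : Bool) (offs : List Int) (N i : Int) :
    (pvRowSet wu wd wl pbc offs N i).Nodup := by
  unfold pvRowSet
  have base : ∀ (js : PySem.Set Int), js.Nodup →
      (List.foldl (fun js r =>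
          let j := if pbc then PySem.Int.mod (i + r) N else i + r
          if decide (0 ≤ j) && decide (j < N) then PySem.Set.add js j else js) js offs).Nodup := by
    induction offs with
    | nil => intro js h; exact h
    | cons r t ih =>
      intro js h
      rw [List.foldl_cons]
      apply ih
      dsimp only
      split <;> first
        | exact PySem.Set.nodup_add js _ h
        | exact h
        | (split <;> first | exact PySem.Set.nodup_add js _ h | exact h)
  apply base
  have h0 : (PySem.Set.empty : PySem.Set Int).Nodup := List.nodup_nil
  have h1 : ∀ (js : PySem.Set Int) (b : Bool) (xs : List Int), js.Nodup →
      (if b then PySem.Set.update js xs else js).Nodup := by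
    intro js b xs h; cases b
    · exact h
    · exact PySem.Set.nodup_update js xs h
  have h2 : ∀ (js : PySem.Set Int) (b : Bool) (x : Int), js.Nodup →
      (if b then PySem.Set.add js x else js).Nodup := by
    intro js b x h; cases b
    · exact h
    · exact PySem.Set.nodup_add js x h
  exact h1 _ _ _ (h2 _ _ _ (h1 _ _ _ h0))

def pvPairsNF (wu wd wl pbc : Bool) (offs : List Int) (N : Int) : List (Int × Int) :=
  (if wu then (PySem.List.pyRange 0 N 1).flatMap (fun i => (PySem.List.pyRange (i + 1) N 1).map (fun j => (i, j))) else []) ++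
  (if wd then (PySem.List.pyRange 0 N 1).map (fun i => (i, i)) else []) ++
  (if wl then (PySem.List.pyRange 0 N 1).flatMap (fun i => (PySem.List.pyRange 0 i 1).map (fun j => (i, j))) else []) ++
  offs.flatMap (fun r =>
    if pbc then (PySem.List.pyRange 0 N 1).map (fun i => (i, PySem.Int.mod (i + r) N))
    else ((PySem.List.pyRange 0 N 1).filter (fun i => decide (0 ≤ i + r) && decide (i + r < N))).map (fun i => (i, i + r)))

theorem pv_mem_pairsNF (wu wd wl pbc : Bool) (offs : List Int) (N : Int) (a b : Int) :
    (a, b) ∈ pvPairsNF wu wd wl pbc offs N ↔ (0 ≤ a ∧ a < N) ∧ pvCond wu wd wl pbc offs N a b := by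
  have hmem : ∀ (bb : Bool) (xs : List (Int × Int)), ((a, b) ∈ if bb then xs else []) ↔ bb = true ∧ (a, b) ∈ xs := by
    intro bb xs; cases bb <;> simp
  unfold pvPairsNF pvCond
  simp only [List.mem_append, hmem, List.mem_flatMap, List.mem_map,
    PySem.List.mem_pyRange_one, Prod.mk.injEq]
  constructor
  · rintro (((⟨hw, i, hi, j, hj, rfl, rfl⟩ | ⟨hw, i, hi, rfl, rfl⟩) | ⟨hw, i, hi, j, hj, rfl, rfl⟩) |
      ⟨r, hr, hblk⟩)
    · exact ⟨hi, Or.inl ⟨hw, by omega, hj.2⟩⟩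
    · exact ⟨hi, Or.inr (Or.inl ⟨hw, rfl⟩)⟩
    · exact ⟨hi, Or.inr (Or.inr (Or.inl ⟨hw, hj.1, hj.2⟩))⟩
    · by_cases hp : pbc = true
      · rw [if_pos hp] at hblk
        simp only [List.mem_map, PySem.List.mem_pyRange_one, Prod.mk.injEq] at hblk
        obtain ⟨i, hi, rfl, rfl⟩ := hblk
        have hN : (0:Int) < N := by omega
        refine ⟨hi, Or.inr (Or.inr (Or.inr ⟨r, hr, ?_, ?_, ?_⟩))⟩
        · rw [if_pos hp]
        · exact PySem.Int.mod_nonneg _ hN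
        · exact PySem.Int.mod_lt _ hN
      · rw [if_neg hp] at hblk
        simp only [List.mem_map, List.mem_filter, PySem.List.mem_pyRange_one,
          Bool.and_eq_true, decide_eq_true_eq, Prod.mk.injEq] at hblk
        obtain ⟨i, ⟨hi, hir⟩, rfl, rfl⟩ := hblk
        exact ⟨hi, Or.inr (Or.inr (Or.inr ⟨r, hr, by rw [if_neg hp], hir.1, hir.2⟩))⟩
  · rintro ⟨ha, hu | hd | hl | ⟨r, hr, hb, hb1, hb2⟩⟩
    · exact Or.inl (Or.inl (Or.inl ⟨hu.1, a, ha, b, ⟨by omega, hu.2.2⟩, rfl, rfl⟩))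
    · exact Or.inl (Or.inl (Or.inr ⟨hd.1, a, ha, rfl, hd.2.symm ▸ rfl⟩))
    · exact Or.inl (Or.inr ⟨hl.1, a, ha, b, ⟨hl.2.1, hl.2.2⟩, rfl, rfl⟩)
    · refine Or.inr ⟨r, hr, ?_⟩
      by_cases hp : pbc = true
      · rw [if_pos hp]
        simp only [List.mem_map, PySem.List.mem_pyRange_one, Prod.mk.injEq]
        exact ⟨a, ha, rfl, by rw [if_pos hp] at hb; exact hb.symm⟩
      · rw [if_neg hp]
        rw [if_neg hp] at hb
        simp only [List.mem_map, List.mem_filter, PySem.List.mem_pyRange_one,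
          Bool.and_eq_true, decide_eq_true_eq, Prod.mk.injEq]
        exact ⟨a, ⟨ha, by omega⟩, rfl, hb.symm⟩

theorem pv_B_flat_pairwise (wu wd wl pbc : Bool) (offs : List Int) (N : Int) :
    ((PySem.List.pyRange 0 N 1).flatMap (fun i =>
        (PySem.List.sorted (pvRowSet wu wd wl pbc offs N i) (fun j => j)).map (fun j => (i, j)))).Pairwise
      (fun a b => a.1 < b.1 ∨ (a.1 = b.1 ∧ a.2 < b.2)) := by
  rw [List.pairwise_flatMap]
  constructor
  · intro i _
    rw [List.pairwise_map]
    have hnd : (PySem.List.sorted (pvRowSet wu wd wl pbc offs N i) (fun j => j)).Nodup :=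
      (PySem.List.sorted_perm (pvRowSet wu wd wl pbc offs N i) (fun j => j) false).symm.nodup
        (pv_nodup_rowSet wu wd wl pbc offs N i)
    have hle := PySem.List.sorted_pairwise (pvRowSet wu wd wl pbc offs N i) (fun j => j)
    refine (hle.and hnd).imp ?_
    intro a b ⟨h1, h2⟩
    exact Or.inr ⟨rfl, lt_of_le_of_ne h1 h2⟩
  · refine (PySem.List.pairwise_lt_pyRange_one 0 N).imp ?_
    intro i1 i2 h x hx y hy
    simp only [List.mem_map] at hx hy
    obtain ⟨j1, _, rfl⟩ := hx
    obtain ⟨j2, _, rfl⟩ := hy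
    exact Or.inl h

theorem pv_B_flat_nodup (wu wd wl pbc : Bool) (offs : List Int) (N : Int) :
    ((PySem.List.pyRange 0 N 1).flatMap (fun i =>
        (PySem.List.sorted (pvRowSet wu wd wl pbc offs N i) (fun j => j)).map (fun j => (i, j)))).Nodup := by
  have := pv_B_flat_pairwise wu wd wl pbc offs N
  refine List.Pairwise.imp ?_ this
  intro a b h
  rcases h with h | ⟨h1, h2⟩
  · intro he; rw [he] at h; exact lt_irrefl _ h
  · intro he; rw [he] at h2; exact lt_irrefl _ h2

theorem pv_B_flat_mem (wu wd wl pbc : Bool) (offs : List Int) (N : Int) (a b : Int) :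
    ((a, b) ∈ (PySem.List.pyRange 0 N 1).flatMap (fun i =>
        (PySem.List.sorted (pvRowSet wu wd wl pbc offs N i) (fun j => j)).map (fun j => (i, j))))
      ↔ (0 ≤ a ∧ a < N) ∧ pvCond wu wd wl pbc offs N a b := by
  simp only [List.mem_flatMap, List.mem_map, PySem.List.mem_pyRange_one, PySem.List.mem_sorted]
  constructor
  · rintro ⟨i, hi, j, hj, he⟩
    rw [Prod.mk.injEq] at he
    obtain ⟨rfl, rfl⟩ := he
    exact ⟨hi, (pv_mem_rowSet wu wd wl pbc offs N i j).mp hj⟩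
  · rintro ⟨ha, hc⟩
    exact ⟨a, ha, b, (pv_mem_rowSet wu wd wl pbc offs N a b).mpr hc, rfl⟩

theorem pv_sorted2_eq_sorted (xs : List (Int × Int)) :
    PySem.List.sorted2 xs (fun p => p.1) (fun p => p.2)
      = PySem.List.sorted xs (fun p => toLex p) := by
  rw [PySem.List.sorted2, PySem.List.sorted_eq_foldl_insertBy]
  simp only [if_neg Bool.false_ne_true]
  have hcmp : (fun (a b : Int × Int) => decide (a.1 < b.1) || (!decide (b.1 < a.1) && decide (a.2 < b.2)))
      = (fun (a b : Int × Int) => decide (toLex a < toLex b)) := by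
    funext a b
    have hlt : (toLex a < toLex b) ↔ (a.1 < b.1 ∨ (a.1 = b.1 ∧ a.2 < b.2)) := by
      simpa using Prod.Lex.lt_iff (x := toLex a) (y := toLex b)
    apply Bool.coe_iff_coe.mp
    rw [Bool.or_eq_true, Bool.and_eq_true, Bool.not_eq_true', decide_eq_true_eq, decide_eq_true_eq,
      decide_eq_false_iff_not, decide_eq_true_eq, hlt]
    omega

  rw [hcmp]

theorem pv_sorted2_eq (xs ys : List (Int × Int)) (hperm : ys.Perm xs)
    (hpw : ys.Pairwise (fun a b => a.1 < b.1 ∨ (a.1 = b.1 ∧ a.2 < b.2))) :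
    PySem.List.sorted2 xs (fun p => p.1) (fun p => p.2) = ys := by
  rw [pv_sorted2_eq_sorted]
  apply PySem.List.sorted_eq_of_perm_of_pairwise_lt xs ys _ hperm
  refine hpw.imp ?_
  intro a b h
  rw [Prod.Lex.lt_iff]
  simpa using h

def pvOffs (bonds : String) : List Int :=
  let rest := PySem.Str.replace (PySem.Str.replace (PySem.Str.replace (PySem.Str.replace bonds "<" "") "=" "") ">" "") "p" ""
  if PySem.Str.isIn "r" rest then
    (((PySem.Str.split? rest "r").getD []).drop 1).filterMap PySem.Int.ofStr?
  else []

theorem pv_step_fold (pbc : Bool) (N : Int) : ∀ (tokens : List String),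
    (∀ t ∈ tokens, (PySem.Int.ofStr? t).isSome = true) → ∀ (init : List (Int × Int)),
    tokens.foldl
      (fun acc t =>
        match PySem.Int.ofStr? t with
        | some r =>
            if pbc then acc ++ (PySem.List.pyRange 0 N 1).map (fun i => (i, PySem.Int.mod (i + r) N))
            else acc ++ ((PySem.List.pyRange 0 N 1).filter (fun i => decide (0 ≤ i + r) && decide (i + r < N))).map (fun i => (i, i + r))
        | none => acc) init
      = init ++ (tokens.filterMap PySem.Int.ofStr?).flatMap (fun r =>
          if pbc then (PySem.List.pyRange 0 N 1).map (fun i => (i, PySem.Int.mod (i + r) N))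
          else ((PySem.List.pyRange 0 N 1).filter (fun i => decide (0 ≤ i + r) && decide (i + r < N))).map (fun i => (i, i + r))) := by
  intro tokens
  induction tokens with
  | nil => intro _ init; simp
  | cons t ts ih =>
    intro h init
    obtain ⟨r, hr⟩ := Option.isSome_iff_exists.mp (h t (List.mem_cons_self ..))
    simp only [List.foldl_cons, List.filterMap_cons, hr, List.flatMap_cons]
    rw [ih (fun t' ht' => h t' (List.mem_cons_of_mem _ ht'))]
    cases pbc <;> simp [List.append_assoc]

theorem pv_A_reduce (bonds : String) (N : Int) (ha : PySem.Str.isIn "a" bonds = false)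
    (hpre : Pre_parse_2site_bonds_py bonds N) :
    parse_2site_bonds_py bonds N
      = PySem.List.sorted2
          (PySem.Set.ofList (pvPairsNF (PySem.Str.isIn "<" bonds) (PySem.Str.isIn "=" bonds)
            (PySem.Str.isIn ">" bonds) (PySem.Str.isIn "p" bonds) (pvOffs bonds) N))
          (fun p => p.1) (fun p => p.2) := by
  simp only [parse_2site_bonds_py, ha, Bool.false_eq_true, if_false, List.nil_append]
  -- name the intermediate strings and membership tests of A
  set s1 := (if PySem.Str.isIn "<" bonds = true then PySem.Str.replace bonds "<" "" else bonds) with hs1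
  set c2 := PySem.Str.isIn "=" s1 with hc2
  set s2 := (if c2 = true then PySem.Str.replace s1 "=" "" else s1) with hs2
  set c3 := PySem.Str.isIn ">" s2 with hc3
  set s3 := (if c3 = true then PySem.Str.replace s2 ">" "" else s2) with hs3
  set c4 := PySem.Str.isIn "p" s3 with hc4
  set s4 := (if c4 = true then PySem.Str.replace s3 "p" "" else s3) with hs4
  have e1 : s1.toList = bonds.toList.filter (fun x => x != '<') := by
    rw [hs1]; exact pv_step_strip bonds "<" '<' rfl
  have f2 : c2 = PySem.Str.isIn "=" bonds := by
    rw [hc2, pv_isIn_single "=" s1 '=' rfl, pv_isIn_single "=" bonds '=' rfl, e1,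
      pv_contains_filter_ne _ _ _ (by decide)]
  have e2 : s2.toList = (bonds.toList.filter (fun x => x != '<')).filter (fun x => x != '=') := by
    rw [hs2, hc2, pv_step_strip s1 "=" '=' rfl, e1]
  have f3 : c3 = PySem.Str.isIn ">" bonds := by
    rw [hc3, pv_isIn_single ">" s2 '>' rfl, pv_isIn_single ">" bonds '>' rfl, e2,
      pv_contains_filter_ne _ _ _ (by decide), pv_contains_filter_ne _ _ _ (by decide)]
  have e3 : s3.toList = ((bonds.toList.filter (fun x => x != '<')).filter (fun x => x != '=')).filter (fun x => x != '>') := by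
    rw [hs3, hc3, pv_step_strip s2 ">" '>' rfl, e2]
  have f4 : c4 = PySem.Str.isIn "p" bonds := by
    rw [hc4, pv_isIn_single "p" s3 'p' rfl, pv_isIn_single "p" bonds 'p' rfl, e3,
      pv_contains_filter_ne _ _ _ (by decide), pv_contains_filter_ne _ _ _ (by decide),
      pv_contains_filter_ne _ _ _ (by decide)]
  have e4 : s4.toList = (((bonds.toList.filter (fun x => x != '<')).filter (fun x => x != '=')).filter (fun x => x != '>')).filter (fun x => x != 'p') := by
    rw [hs4, hc4, pv_step_strip s3 "p" 'p' rfl, e3]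
  have hrest : s4 = PySem.Str.replace (PySem.Str.replace (PySem.Str.replace (PySem.Str.replace bonds "<" "") "=" "") ">" "") "p" "" := by
    apply String.toList_inj.mp
    rw [e4, pv_replace_single _ "p" 'p' rfl, pv_replace_single _ ">" '>' rfl,
      pv_replace_single _ "=" '=' rfl, pv_replace_single _ "<" '<' rfl]
  rw [hrest, f2, f3, f4]
  unfold pvOffs
  refine congrArg (fun l => PySem.List.sorted2 (PySem.Set.ofList l) (fun p : Int × Int => p.1) (fun p : Int × Int => p.2)) ?_
  simp only [Pre_parse_2site_bonds_py] at hpre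
  by_cases hr5 : PySem.Str.isIn "r" (PySem.Str.replace (PySem.Str.replace (PySem.Str.replace (PySem.Str.replace bonds "<" "") "=" "") ">" "") "p" "") = true
  · rw [if_pos hr5, if_pos hr5]
    have htok : ∀ t ∈ (((PySem.Str.split? (PySem.Str.replace (PySem.Str.replace (PySem.Str.replace (PySem.Str.replace bonds "<" "") "=" "") ">" "") "p" "") "r").getD []).drop 1),
        (PySem.Int.ofStr? t).isSome = true := by
      rcases hpre with h | h | h
      · rw [ha] at h; exact absurd h Bool.false_ne_true
      · rw [hr5] at h; exact absurd h.symm Bool.false_ne_true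
      · exact h
    rw [pv_step_fold (PySem.Str.isIn "p" bonds) N _ htok]
    cases h1 : PySem.Str.isIn "<" bonds <;> cases h2 : PySem.Str.isIn "=" bonds <;>
      cases h3 : PySem.Str.isIn ">" bonds <;>
      simp [pvPairsNF, List.append_assoc]
  · rw [if_neg hr5, if_neg hr5]
    cases h1 : PySem.Str.isIn "<" bonds <;> cases h2 : PySem.Str.isIn "=" bonds <;>
      cases h3 : PySem.Str.isIn ">" bonds <;>
      simp [pvPairsNF, List.append_assoc]

-- the early exit of B returns [] exactly when every row set is empty, so it folds into the loop
theorem pv_guard_if (wu wd wl pbc : Bool) (offs : List Int) (N : Int) :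
    (if !(wu || wd || wl || !offs.isEmpty) then ([] : List (Int × Int))
     else (PySem.List.pyRange 0 N 1).foldl
       (fun out i => out ++ (PySem.List.sorted (pvRowSet wu wd wl pbc offs N i) (fun j => j)).map (fun j => (i, j))) [])
    = (PySem.List.pyRange 0 N 1).foldl
       (fun out i => out ++ (PySem.List.sorted (pvRowSet wu wd wl pbc offs N i) (fun j => j)).map (fun j => (i, j))) [] := by
  by_cases hg : (!(wu || wd || wl || !offs.isEmpty)) = true
  · rw [if_pos hg]
    simp only [Bool.not_eq_true', Bool.or_eq_false_iff, Bool.not_eq_false] at hg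
    obtain ⟨⟨⟨hwu, hwd⟩, hwl⟩, hoffs⟩ := hg
    have hrow : ∀ i : Int, pvRowSet wu wd wl pbc offs N i = PySem.Set.empty := by
      intro i
      unfold pvRowSet
      have : offs = [] := List.isEmpty_iff.mp (by simpa using hoffs)
      rw [hwu, hwd, hwl, this]
      simp
    rw [PySem.List.foldl_append_eq_flatMap
      (g := fun i => (PySem.List.sorted (pvRowSet wu wd wl pbc offs N i) (fun j => j)).map (fun j => (i, j)))]
    rw [List.nil_append]
    symm
    rw [List.flatMap_eq_nil_iff]
    intro i _
    rw [hrow i]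
    rfl
  · rw [if_neg hg]

theorem pv_B_reduce (bonds : String) (N : Int) (ha : PySem.Str.isIn "a" bonds = false) :
    parse_2site_bonds_py_alt bonds N
      = (PySem.List.pyRange 0 N 1).flatMap (fun i =>
          (PySem.List.sorted (pvRowSet (PySem.Str.isIn "<" bonds) (PySem.Str.isIn "=" bonds)
            (PySem.Str.isIn ">" bonds) (PySem.Str.isIn "p" bonds) (pvOffs bonds) N i) (fun j => j)).map (fun j => (i, j))) := by
  unfold parse_2site_bonds_py_alt pvOffs
  rw [if_neg (by rw [ha]; exact Bool.false_ne_true)]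
  rw [pv_guard_if]
  rw [PySem.List.foldl_append_eq_flatMap
    (g := fun i => (PySem.List.sorted (pvRowSet (PySem.Str.isIn "<" bonds) (PySem.Str.isIn "=" bonds)
      (PySem.Str.isIn ">" bonds) (PySem.Str.isIn "p" bonds)
      (if PySem.Str.isIn "r" (PySem.Str.replace (PySem.Str.replace (PySem.Str.replace (PySem.Str.replace bonds "<" "") "=" "") ">" "") "p" "") = true then
        (((PySem.Str.split? (PySem.Str.replace (PySem.Str.replace (PySem.Str.replace (PySem.Str.replace bonds "<" "") "=" "") ">" "") "p" "") "r").getD []).drop 1).filterMap PySem.Int.ofStr?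
      else []) N i) (fun j => j)).map (fun j => (i, j)))]
  rw [List.nil_append]

-- ===== VERDICT (by name: the statement is the Claim_ definition above) =====
theorem parse_2site_bonds_py_spec : Claim_equal_parse_2site_bonds_py := by
  intro bonds N _ hpre
  unfold Spec_parse_2site_bonds_py
  by_cases ha : PySem.Str.isIn "a" bonds = true
  · simp only [parse_2site_bonds_py, parse_2site_bonds_py_alt, ha, if_true]
  · replace ha : PySem.Str.isIn "a" bonds = false := by simpa using ha
    rw [pv_A_reduce bonds N ha hpre, pv_B_reduce bonds N ha]
    apply pv_sorted2_eq
    · rw [List.perm_ext_iff_of_nodup (pv_B_flat_nodup _ _ _ _ _ _) (PySem.Set.nodup_ofList _)]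
      rintro ⟨a, b⟩
      rw [PySem.Set.mem_ofList, pv_B_flat_mem, pv_mem_pairsNF]
    · exact pv_B_flat_pairwise _ _ _ _ _ _
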